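-- pv_equiv track=rewrite | github.com/saypinkx/algoritms4.0 | Razminka/J.py | is_mod
-- ===== SOURCE A (Python) =====
-- def is_mod(n, a, b):
--     old_n = n
--     for i in range(b, a - 1, -1):
--         b = i
--         n = old_n
--         while n % b > 0 and b != a:
--             n = n % b
--             b = b - 1
--         if n % b == 0:
--             return 'YES'
--     return 'NO'
-- ===== SOURCE B (Python) =====
-- def is_mod(n, a, b):
--     return 'YES' if any(n % i == 0 or n % i >= a
--                         for i in range(b, a - 1, -1)) else 'NO'
-- ===== Notes on version B (the rewrite author's own statement) =====
-- stated objective: faster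
-- what changed: A runs, for each i from b down to a, an inner while-loop that repeatedly replaces n by n % b while decrementing b; B drops the inner loop entirely: a single any() over the same countdown testing 'n % i == 0 or n % i >= a', which characterises when A's inner chain ends in a zero remainder; Pre_ excludes the degenerate region a <= 0 and b <= 0 (at b = 0 A raises ZeroDivisionError, and for b < 0 the scan runs over negative moduli, a corner outside the divisor task where either answer is defensible).
-- outside the precondition, e.g. on is_mod(7, -3, -2): A returns 'NO', B returns 'YES'
import Mathlib
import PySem

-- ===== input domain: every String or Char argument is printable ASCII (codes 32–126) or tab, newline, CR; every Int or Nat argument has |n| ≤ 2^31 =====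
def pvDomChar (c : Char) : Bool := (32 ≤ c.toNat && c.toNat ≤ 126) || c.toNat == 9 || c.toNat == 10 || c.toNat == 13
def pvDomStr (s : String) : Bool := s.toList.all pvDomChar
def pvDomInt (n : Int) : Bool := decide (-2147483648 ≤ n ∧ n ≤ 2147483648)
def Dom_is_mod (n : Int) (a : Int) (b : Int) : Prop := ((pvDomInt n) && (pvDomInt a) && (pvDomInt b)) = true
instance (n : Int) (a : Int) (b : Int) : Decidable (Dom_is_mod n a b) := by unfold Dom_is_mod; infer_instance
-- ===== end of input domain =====

-- B replaces A's nested mod-chain scan by a single pass testing `n % i == 0 or n % i >= a`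
-- over the same countdown (objective: faster, O(b-a) instead of O((b-a)^2)).


-- ===== PORT A =====
-- inner `while n % b > 0 and b != a: n = n % b; b = b - 1`; returns the final (n, b).
-- Termination: recursion requires PySem.Int.mod n b > 0, which forces 0 ≤ b, and b decreases.
def isModInner (a : Int) (n : Int) (b : Int) : Int × Int :=
  if h : PySem.Int.mod n b > 0 ∧ b ≠ a then
    isModInner a (PySem.Int.mod n b) (b - 1)
  else (n, b)
termination_by (b + 1).toNat
decreasing_by
  have hb : 0 ≤ b := by
    by_contra hneg
    have := (PySem.Int.mod_neg_bounds (a := n) (b := b) (by omega)).2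
    omega
  omega

-- outer `for i in range(b, a - 1, -1)` with early return; Python's range is lazy,
-- so the loop is ported as a countdown recursion visiting i = b, b-1, …, a
def isModOuter (old_n : Int) (a : Int) (i : Int) : String :=
  if _h : a ≤ i then
    let p := isModInner a old_n i
    if PySem.Int.mod p.1 p.2 == 0 then "YES" else isModOuter old_n a (i - 1)
  else "NO"
termination_by (i - a + 1).toNat
decreasing_by omega

def is_mod (n : Int) (a : Int) (b : Int) : String :=
  isModOuter n a b

-- ===== PORT B =====
-- `any(n % i == 0 or n % i >= a for i in range(b, a - 1, -1))`: a lazy short-circuit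
-- scan, ported as a countdown recursion over i = b, b-1, …, a
def isModAltAny (n : Int) (a : Int) (i : Int) : Bool :=
  if _h : a ≤ i then
    if PySem.Int.mod n i == 0 || decide (a ≤ PySem.Int.mod n i) then true
    else isModAltAny n a (i - 1)
  else false
termination_by (i - a + 1).toNat
decreasing_by omega

def is_mod_alt (n : Int) (a : Int) (b : Int) : String :=
  if isModAltAny n a b then "YES" else "NO"

-- ===== PRECONDITION & SPEC =====
-- Pre_ excludes the degenerate region a ≤ 0 ∧ b ≤ 0: at b = 0 A raises
-- ZeroDivisionError (n % 0), and for b < 0 the whole scan runs over NEGATIVE moduli,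
-- a corner outside the task's divisor domain where either answer is defensible
-- (A tests only exact divisibility there since its chain never runs; B also accepts
-- remainders ≥ a).
def Pre_is_mod (n : Int) (a : Int) (b : Int) : Prop := 0 < a ∨ 0 < b
instance (n : Int) (a : Int) (b : Int) : Decidable (Pre_is_mod n a b) := by unfold Pre_is_mod; infer_instance
def pvWitness_is_mod : Int × Int × Int := (10, 2, 7)

def Spec_is_mod (n : Int) (a : Int) (b : Int) (out : String) : Prop := out = is_mod_alt n a b
instance (n : Int) (a : Int) (b : Int) (out : String) : Decidable (Spec_is_mod n a b out) := by unfold Spec_is_mod; infer_instance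

-- ===== CLAIM (what is proved, stated in full; the proofs are below) =====
def Claim_equal_is_mod : Prop := ∀ (n : Int) (a : Int) (b : Int), Dom_is_mod n a b → Pre_is_mod n a b → Spec_is_mod n a b (is_mod n a b)

-- ===== LEMMAS AND PROOFS =====

-- The descent phase of the inner loop: from a state 0 < n' ≤ b' with a ≤ b',
-- the final `n % b == 0` test succeeds iff a ≤ n'.
lemma inner_descent : ∀ (k : Nat) (a n' b' : Int), 0 < n' → n' ≤ b' → a ≤ b' → (b' - a).toNat = k →
    ((PySem.Int.mod (isModInner a n' b').1 (isModInner a n' b').2 = 0) ↔ a ≤ n') := by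
  intro k
  induction k with
  | zero =>
    intro a n' b' hn hnb hab hk
    have hba : b' = a := by omega
    rcases eq_or_lt_of_le hnb with heq | hlt
    · have hm : PySem.Int.mod n' b' = 0 := by
        rw [PySem.Int.mod_eq_zero_iff_dvd]; exact heq ▸ dvd_refl n'
      have hc : ¬ (PySem.Int.mod n' b' > 0 ∧ b' ≠ a) := by simp [hm]
      rw [isModInner, dif_neg hc, hm]
      omega
    · have hm : PySem.Int.mod n' b' = n' := by
        rw [PySem.Int.mod_eq_emod_of_pos (by omega)]
        exact Int.emod_eq_of_lt (by omega) hlt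
      rw [isModInner, dif_neg (fun hc => hc.2 hba), hm]
      omega
  | succ k ih =>
    intro a n' b' hn hnb hab hk
    have hba : a < b' := by omega
    rcases eq_or_lt_of_le hnb with heq | hlt
    · have hm : PySem.Int.mod n' b' = 0 := by
        rw [PySem.Int.mod_eq_zero_iff_dvd]; exact heq ▸ dvd_refl n'
      have hc : ¬ (PySem.Int.mod n' b' > 0 ∧ b' ≠ a) := by simp [hm]
      rw [isModInner, dif_neg hc, hm]
      omega
    · have hm : PySem.Int.mod n' b' = n' := by
        rw [PySem.Int.mod_eq_emod_of_pos (by omega)]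
        exact Int.emod_eq_of_lt (by omega) hlt
      rw [isModInner, dif_pos ⟨by omega, by omega⟩, hm]
      exact ih a n' (b' - 1) hn (by omega) (by omega) (by omega)

-- one outer iteration at i > 0: the test equals `n % i == 0 or n % i >= a`
lemma iter_pos (a i n : Int) (hi : 0 < i) (hai : a ≤ i) :
    ((PySem.Int.mod (isModInner a n i).1 (isModInner a n i).2 = 0) ↔
      (PySem.Int.mod n i = 0 ∨ a ≤ PySem.Int.mod n i)) := by
  set r := PySem.Int.mod n i with hr
  have hr0 : 0 ≤ r := PySem.Int.mod_nonneg n hi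
  have hrlt : r < i := PySem.Int.mod_lt n hi
  rcases eq_or_lt_of_le hr0 with hz | hpos
  · rw [isModInner]
    simp [← hr, ← hz]
  · by_cases hia : i = a
    · rw [isModInner, dif_neg (fun hc => hc.2 hia), ← hr]
      omega
    · rw [isModInner]
      rw [dif_pos ⟨by omega, hia⟩, ← hr]
      rw [inner_descent (i - 1 - a).toNat a r (i - 1) (by omega) (by omega) (by omega) rfl]
      omega

-- A's early-return countdown is an existence test over range(i, a-1, -1)
lemma outer_eq_any : ∀ (k : Nat) (n a i : Int), (i - a + 1).toNat = k →
    isModOuter n a i =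
      if (PySem.List.pyRange i (a - 1) (-1)).any
          (fun j => PySem.Int.mod (isModInner a n j).1 (isModInner a n j).2 == 0)
      then "YES" else "NO" := by
  intro k
  induction k with
  | zero =>
    intro n a i hk
    rw [isModOuter, dif_neg (by omega), PySem.List.pyRange_neg_one_eq_nil (by omega)]
    simp
  | succ k ih =>
    intro n a i hk
    rw [isModOuter, dif_pos (by omega), PySem.List.pyRange_neg_one_cons (by omega), List.any_cons]
    by_cases h : PySem.Int.mod (isModInner a n i).1 (isModInner a n i).2 = 0
    · simp [h]
    · have hb : (PySem.Int.mod (isModInner a n i).1 (isModInner a n i).2 == 0) = false := by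
        simpa using h
      rw [ih n a (i - 1) (by omega)]
      simp only [hb, Bool.false_or]
      simp

-- B's short-circuit scan is an existence test over range(i, a-1, -1)
lemma alt_eq_any : ∀ (k : Nat) (n a i : Int), (i - a + 1).toNat = k →
    isModAltAny n a i =
      (PySem.List.pyRange i (a - 1) (-1)).any (fun j =>
        PySem.Int.mod n j == 0 || decide (a ≤ PySem.Int.mod n j)) := by
  intro k
  induction k with
  | zero =>
    intro n a i hk
    rw [isModAltAny, dif_neg (by omega), PySem.List.pyRange_neg_one_eq_nil (by omega)]
    simp
  | succ k ih =>
    intro n a i hk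
    rw [isModAltAny, dif_pos (by omega), PySem.List.pyRange_neg_one_cons (by omega), List.any_cons]
    by_cases h : (PySem.Int.mod n i == 0 || decide (a ≤ PySem.Int.mod n i)) = true
    · simp [h]
    · rw [ih n a (i - 1) (by omega)]
      simp [Bool.eq_false_iff.mpr h]

-- pointwise equality of A's per-iteration test and B's predicate, for positive i
lemma test_eq_pos (n a i : Int) (hi : 0 < i) (hai : a ≤ i) :
    (PySem.Int.mod (isModInner a n i).1 (isModInner a n i).2 == 0)
      = (PySem.Int.mod n i == 0 || decide (a ≤ PySem.Int.mod n i)) := by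
  rw [Bool.eq_iff_iff]
  have h1 := iter_pos a i n hi hai
  simp [beq_iff_eq, h1]

-- ===== VERDICT (by name: the statement is the Claim_ definition above) =====
theorem is_mod_spec : Claim_equal_is_mod := by
  unfold Claim_equal_is_mod
  intro n a b _ hpre
  unfold Spec_is_mod is_mod is_mod_alt
  rw [outer_eq_any (b - a + 1).toNat n a b rfl, alt_eq_any (b - a + 1).toNat n a b rfl]
  suffices h : (PySem.List.pyRange b (a-1) (-1)).any
        (fun i => PySem.Int.mod (isModInner a n i).1 (isModInner a n i).2 == 0)
      = (PySem.List.pyRange b (a-1) (-1)).any (fun i =>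
        PySem.Int.mod n i == 0 || decide (a ≤ PySem.Int.mod n i)) by
    rw [h]
  by_cases hab : b < a
  · rw [PySem.List.pyRange_neg_one_eq_nil (by omega)]
    simp
  · rw [not_lt] at hab
    by_cases ha1 : 1 ≤ a
    · -- every i in the range is positive: pointwise equality of the tests
      refine PySem.List.any_congr_mem (fun i hi => ?_)
      rw [PySem.List.mem_pyRange_neg_one] at hi
      exact test_eq_pos n a i (by omega) (by omega)
    · -- a ≤ 0 and (by Pre_) 0 < b: both scans say YES at i = b
      rw [not_le] at ha1
      have hb1 : 0 < b := by
        unfold Pre_is_mod at hpre; omega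
      have hf : (PySem.List.pyRange b (a-1) (-1)).any
          (fun i => PySem.Int.mod (isModInner a n i).1 (isModInner a n i).2 == 0) = true := by
        rw [List.any_eq_true]
        refine ⟨b, PySem.List.mem_pyRange_neg_one.mpr (by omega), ?_⟩
        have := PySem.Int.mod_nonneg n hb1
        simp [(iter_pos a b n hb1 (by omega))]
        omega
      have hg : (PySem.List.pyRange b (a-1) (-1)).any (fun i =>
          PySem.Int.mod n i == 0 || decide (a ≤ PySem.Int.mod n i)) = true := by
        rw [List.any_eq_true]
        refine ⟨b, PySem.List.mem_pyRange_neg_one.mpr (by omega), ?_⟩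
        have := PySem.Int.mod_nonneg n hb1
        simp
        omega
      rw [hf, hg]
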